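-- pv_equiv track=rewrite | github.com/CodelineAtyab/OrbitXO | examples/from_almuhannad/TextFlow/logic.py | _process_segment
-- ===== SOURCE A (Python) =====
-- from typing import List, Tuple
--
-- def _get_char_value(char: str) -> int:
--
--     if 'a' <= char <= 'z':
--         return ord(char) - ord('a') + 1
--     return 0
--
-- def _parse_count(s: str, index: int) -> Tuple[int, int]:
--
--     count = 0
--     while index < len(s) and s[index] == 'z':
--         count += 26
--         index += 1
--
--     if index < len(s):
--         count += _get_char_value(s[index])
--         index += 1
--     return count, index
--
-- def _process_segment(s: str, index: int) -> Tuple[int, int]: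
--
--     count, index = _parse_count(s, index)
--
--     sub_chars_end_index = index
--     items_to_collect = count
--
--     while items_to_collect > 0 and sub_chars_end_index < len(s):
--         if s[sub_chars_end_index] == 'z':
--
--             temp_index = sub_chars_end_index
--             while temp_index < len(s) and s[temp_index] == 'z':
--                 temp_index += 1
--             if temp_index < len(s):
--                 temp_index += 1
--             sub_chars_end_index = temp_index
--         else:
--             sub_chars_end_index += 1
--         items_to_collect -= 1
--
--     sub_chars = s[index:sub_chars_end_index]
--     current_sum = sum(_get_char_value(c) for c in sub_chars)
--     return current_sum, sub_chars_end_index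
-- ===== SOURCE B (Python) =====
-- from typing import Tuple
--
-- def _get_char_value(char: str) -> int:
--     if 'a' <= char <= 'z':
--         return ord(char) - ord('a') + 1
--     return 0
--
-- def _parse_count(s: str, index: int) -> Tuple[int, int]:
--     count = 0
--     while index < len(s) and s[index] == 'z':
--         count += 26
--         index += 1
--     if index < len(s):
--         count += _get_char_value(s[index])
--         index += 1
--     return count, index
--
-- def _process_segment(s: str, index: int) -> Tuple[int, int]:
--     count, end = _parse_count(s, index)
--     total = 0
--     for _ in range(count):
--         if end >= len(s):
--             break
--         val, end = _parse_count(s, end)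
--         total += val
--     return total, end
-- ===== Notes on version B (the rewrite author's own statement) =====
-- stated objective: simpler
-- what changed: B reuses the parsing primitive _parse_count as the single stepping/summing operation, looping count times and accumulating its returned values, which removes A's inner z-run while-loop, its end-index bookkeeping branch, the slice, and the separate sum-over-slice pass.
-- outside the precondition, e.g. on _process_segment(' yyab', -4): A returns (28, 5), B returns (81, 5)
import Mathlib
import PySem

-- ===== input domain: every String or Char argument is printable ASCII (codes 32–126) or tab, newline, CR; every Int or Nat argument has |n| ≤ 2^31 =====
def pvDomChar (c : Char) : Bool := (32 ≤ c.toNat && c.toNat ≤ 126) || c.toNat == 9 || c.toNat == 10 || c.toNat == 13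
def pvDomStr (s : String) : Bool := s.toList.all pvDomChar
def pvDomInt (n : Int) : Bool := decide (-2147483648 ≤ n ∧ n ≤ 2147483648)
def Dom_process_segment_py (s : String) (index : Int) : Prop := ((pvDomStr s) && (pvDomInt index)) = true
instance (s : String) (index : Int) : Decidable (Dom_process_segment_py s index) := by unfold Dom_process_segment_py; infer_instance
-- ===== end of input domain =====

-- B replaces A's inner z-run scan, end-index bookkeeping and separate slice-sum pass by repeated
-- calls to the parsing primitive, accumulating its values (objective: simpler). Return value only; no mutation.

-- shared helpers: literal ports of _get_char_value and _parse_count (used verbatim by BOTH Pythons)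
-- 'a' <= char <= 'z' on single ASCII chars is exactly the code-point comparison
def charVal (c : Char) : Nat := if 'a' ≤ c ∧ c ≤ 'z' then c.toNat - 'a'.toNat + 1 else 0

-- the z-run while-loop of _parse_count (count, index as state; the nested if is the short-circuit 'and')
def zrun (cs : List Char) (count i : Nat) : Nat × Nat :=
  if h : i < cs.length then
    if cs[i]'h = 'z' then zrun cs (count + 26) (i + 1) else (count, i)
  else (count, i)
termination_by cs.length - i
decreasing_by omega

def parseCount (cs : List Char) (i : Nat) : Nat × Nat :=
  let (c, j) := zrun cs 0 i
  if hj : j < cs.length then (c + charVal (cs[j]'hj), j + 1) else (c, j)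

-- ===== PORT A =====
-- inner while-loop 'temp_index': skip the z-run
def zskip (cs : List Char) (t : Nat) : Nat :=
  if h : t < cs.length then
    if cs[t]'h = 'z' then zskip cs (t + 1) else t
  else t
termination_by cs.length - t
decreasing_by omega

-- A's collection while-loop (guard: items > 0 and end < len); returns the final end index
def collectA (cs : List Char) (items e : Nat) : Nat :=
  match items with
  | 0 => e
  | items + 1 =>
    if he : e < cs.length then
      if cs[e]'he = 'z' then
        let t := zskip cs e
        collectA cs items (if t < cs.length then t + 1 else t)
      else collectA cs items (e + 1)
    else e

-- sum(_get_char_value(c) for c in s[a:b]); for 0 <= a <= b the Python slice is exactly drop/take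
def sliceSum (cs : List Char) (a b : Nat) : Nat :=
  (((cs.drop a).take (b - a)).map charVal).sum

-- index.toNat is exact on Pre_ (0 <= index)
def process_segment_py (s : String) (index : Int) : Int × Int :=
  let cs := s.toList
  let (count, j) := parseCount cs index.toNat
  let e := collectA cs count j
  ((sliceSum cs j e : Int), (e : Int))

-- ===== PORT B =====
-- B's for-loop over range(count) with break, accumulating _parse_count's values
def collectB (cs : List Char) (count total e : Nat) : Nat × Nat :=
  match count with
  | 0 => (total, e)
  | n + 1 =>
    if e < cs.length then
      let (v, e') := parseCount cs e
      collectB cs n (total + v) e'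
    else (total, e)

def process_segment_py_alt (s : String) (index : Int) : Int × Int :=
  let cs := s.toList
  let (count, j) := parseCount cs index.toNat
  let (total, e) := collectB cs count 0 j
  ((total : Int), (e : Int))

-- ===== PRECONDITION & SPEC =====
-- Pre_ excludes negative indices: there A either raises IndexError (index < -len(s)) or returns a
-- value produced by Python's negative-index wraparound reads mixed with clamped slicing — an
-- unspecified corner for a parser taking a position in the stream; B reads the stream naturally there.
def Pre_process_segment_py (s : String) (index : Int) : Prop := 0 ≤ index
instance (s : String) (index : Int) : Decidable (Pre_process_segment_py s index) := by unfold Pre_process_segment_py; infer_instance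
def pvWitness_process_segment_py : String × Int := ("zbabc", 0)

def Spec_process_segment_py (s : String) (index : Int) (out : Int × Int) : Prop := out = process_segment_py_alt s index
instance (s : String) (index : Int) (out : Int × Int) : Decidable (Spec_process_segment_py s index out) := by unfold Spec_process_segment_py; infer_instance

-- ===== CLAIM (what is proved, stated in full; the proofs are below) =====
def Claim_equal_process_segment_py : Prop := ∀ (s : String) (index : Int), Dom_process_segment_py s index → Pre_process_segment_py s index → Spec_process_segment_py s index (process_segment_py s index)

-- ===== LEMMAS AND PROOFS =====

theorem zskip_le (cs : List Char) (t : Nat) : t ≤ zskip cs t := by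
  unfold zskip
  split
  · split
    · exact le_trans (Nat.le_succ t) (zskip_le cs (t + 1))
    · exact le_refl t
  · exact le_refl t
termination_by cs.length - t
decreasing_by omega

theorem zskip_step (cs : List Char) (t : Nat) (h : t < cs.length) (hz : cs[t]'h = 'z') :
    zskip cs t = zskip cs (t + 1) := by
  conv_lhs => unfold zskip
  simp [h, hz]

theorem zskip_self (cs : List Char) (t : Nat) (h : ∀ (hlt : t < cs.length), cs[t]'hlt ≠ 'z') :
    zskip cs t = t := by
  unfold zskip
  split
  · rename_i hlt
    simp [h hlt]
  · rfl

theorem zrun_eq (cs : List Char) (c i : Nat) :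
    zrun cs c i = (c + 26 * (zskip cs i - i), zskip cs i) := by
  unfold zrun
  split
  · rename_i h
    split
    · rename_i hz
      rw [zrun_eq cs (c + 26) (i + 1), zskip_step cs i h hz]
      have h1 : i + 1 ≤ zskip cs (i + 1) := zskip_le cs (i + 1)
      simp only [Prod.mk.injEq, and_true]
      omega
    · rename_i hz
      rw [zskip_self cs i (fun _ => hz)]
      simp
  · rename_i h
    rw [zskip_self cs i (fun hlt => absurd hlt h)]
    simp
termination_by cs.length - i
decreasing_by omega

theorem parseCount_lt (cs : List Char) (e : Nat) (hj : zskip cs e < cs.length) :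
    parseCount cs e = (26 * (zskip cs e - e) + charVal (cs[zskip cs e]'hj), zskip cs e + 1) := by
  unfold parseCount
  rw [zrun_eq]
  simp [hj]

theorem parseCount_ge (cs : List Char) (e : Nat) (hj : ¬ zskip cs e < cs.length) :
    parseCount cs e = (26 * (zskip cs e - e), zskip cs e) := by
  unfold parseCount
  rw [zrun_eq]
  simp [hj]

theorem sliceSum_split (cs : List Char) (a b : Nat) (ha : a < cs.length) (hab : a < b) :
    sliceSum cs a b = charVal (cs[a]'ha) + sliceSum cs (a + 1) b := by
  unfold sliceSum
  have hd : cs.drop a = cs[a]'ha :: cs.drop (a + 1) := List.drop_eq_getElem_cons ha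
  rw [hd]
  have hba : b - a = (b - (a + 1)) + 1 := by omega
  rw [hba, List.take_succ_cons, List.map_cons, List.sum_cons]

theorem sliceSum_zrun (cs : List Char) (i b : Nat) (hb : zskip cs i ≤ b) :
    sliceSum cs i b = 26 * (zskip cs i - i) + sliceSum cs (zskip cs i) b := by
  by_cases hi : i < cs.length
  · by_cases hz : cs[i]'hi = 'z'
    · have step := zskip_step cs i hi hz
      have h1 : i + 1 ≤ zskip cs (i + 1) := zskip_le cs (i + 1)
      have hrec := sliceSum_zrun cs (i + 1) b (by rw [← step]; exact hb)
      rw [step, sliceSum_split cs i b hi (by omega), hz]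
      have hcv : charVal 'z' = 26 := by decide
      rw [hcv, hrec]
      omega
    · rw [zskip_self cs i (fun _ => hz)]
      omega
  · rw [zskip_self cs i (fun hlt => absurd hlt hi)]
    omega
termination_by cs.length - i
decreasing_by omega

-- one-step unfold equations for A's while-loop
theorem collectA_z_lt (cs : List Char) (n e : Nat) (he : e < cs.length) (hz : cs[e]'he = 'z')
    (htl : zskip cs e < cs.length) :
    collectA cs (n + 1) e = collectA cs n (zskip cs e + 1) := by
  conv_lhs => unfold collectA
  simp [he, hz, htl]

theorem collectA_z_ge (cs : List Char) (n e : Nat) (he : e < cs.length) (hz : cs[e]'he = 'z')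
    (htl : ¬ zskip cs e < cs.length) :
    collectA cs (n + 1) e = collectA cs n (zskip cs e) := by
  conv_lhs => unfold collectA
  simp [he, hz, htl]

theorem collectA_nz (cs : List Char) (n e : Nat) (he : e < cs.length) (hz : cs[e]'he ≠ 'z') :
    collectA cs (n + 1) e = collectA cs n (e + 1) := by
  conv_lhs => unfold collectA
  simp [he, hz]

theorem collectA_stop (cs : List Char) (n e : Nat) (he : ¬ e < cs.length) :
    collectA cs (n + 1) e = e := by
  conv_lhs => unfold collectA
  simp [he]

theorem collectA_mono (cs : List Char) (n e : Nat) : e ≤ collectA cs n e := by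
  induction n generalizing e with
  | zero => simp [collectA]
  | succ n ih =>
    by_cases he : e < cs.length
    · by_cases hz : cs[e]'he = 'z'
      · have ht := zskip_le cs e
        by_cases htl : zskip cs e < cs.length
        · rw [collectA_z_lt cs n e he hz htl]
          exact le_trans (by omega) (ih (zskip cs e + 1))
        · rw [collectA_z_ge cs n e he hz htl]
          exact le_trans ht (ih (zskip cs e))
      · rw [collectA_nz cs n e he hz]
        exact le_trans (Nat.le_succ e) (ih (e + 1))
    · rw [collectA_stop cs n e he]

theorem collectB_eq (cs : List Char) (n total e : Nat) :
    collectB cs n total e = (total + sliceSum cs e (collectA cs n e), collectA cs n e) := by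
  induction n generalizing total e with
  | zero =>
    simp [collectB, collectA, sliceSum]
  | succ n ih =>
    by_cases he : e < cs.length
    · by_cases hz : cs[e]'he = 'z'
      · by_cases htl : zskip cs e < cs.length
        · rw [collectA_z_lt cs n e he hz htl]
          conv_lhs => unfold collectB
          rw [if_pos he, parseCount_lt cs e htl]
          simp only [ih]
          have hbt : zskip cs e + 1 ≤ collectA cs n (zskip cs e + 1) := collectA_mono cs n _
          have hte : e ≤ zskip cs e := zskip_le cs e
          have h1 : sliceSum cs e (collectA cs n (zskip cs e + 1))
              = 26 * (zskip cs e - e) + sliceSum cs (zskip cs e) (collectA cs n (zskip cs e + 1)) :=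
            sliceSum_zrun cs e _ (by omega)
          have h2 : sliceSum cs (zskip cs e) (collectA cs n (zskip cs e + 1))
              = charVal (cs[zskip cs e]'htl) + sliceSum cs (zskip cs e + 1) (collectA cs n (zskip cs e + 1)) :=
            sliceSum_split cs (zskip cs e) _ htl (by omega)
          simp only [Prod.mk.injEq, and_true]
          omega
        · rw [collectA_z_ge cs n e he hz htl]
          conv_lhs => unfold collectB
          rw [if_pos he, parseCount_ge cs e htl]
          simp only [ih]
          have hbt : zskip cs e ≤ collectA cs n (zskip cs e) := collectA_mono cs n _
          have h1 : sliceSum cs e (collectA cs n (zskip cs e))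
              = 26 * (zskip cs e - e) + sliceSum cs (zskip cs e) (collectA cs n (zskip cs e)) :=
            sliceSum_zrun cs e _ (by omega)
          simp only [Prod.mk.injEq, and_true]
          omega
      · rw [collectA_nz cs n e he hz]
        have hz0 : zskip cs e = e := zskip_self cs e (fun _ => hz)
        conv_lhs => unfold collectB
        rw [if_pos he, parseCount_lt cs e (by rw [hz0]; exact he)]
        simp only [ih]
        have hbt : e + 1 ≤ collectA cs n (e + 1) := collectA_mono cs n _
        have h2 : sliceSum cs e (collectA cs n (e + 1))
            = charVal (cs[e]'he) + sliceSum cs (e + 1) (collectA cs n (e + 1)) :=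
          sliceSum_split cs e _ he (by omega)
        simp only [hz0, Prod.mk.injEq, and_true]
        omega
    · rw [collectA_stop cs n e he]
      conv_lhs => unfold collectB
      rw [if_neg he]
      simp [sliceSum]

-- ===== VERDICT (by name: the statement is the Claim_ definition above) =====
theorem process_segment_py_spec : Claim_equal_process_segment_py := by
  intro s index _ _
  unfold Spec_process_segment_py process_segment_py process_segment_py_alt
  cases hp : parseCount s.toList index.toNat with
  | mk count j =>
    simp only [hp, collectB_eq, Nat.zero_add]
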